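-- pv_equiv track=rewrite | github.com/eloyhz/competitive-programming | codeforces/training/CF742-D2-A.py | solve_tle
-- ===== SOURCE A (Python) =====
-- def solve_tle(n):
--     if n == 0:
--         return 1
--     else:
--         result = 1
--         for i in range(n):
--             result = (result * 8) % 10
--         return result
-- ===== SOURCE B (Python) =====
-- def solve_tle(n):
--     if n <= 0:
--         return 1
--     return [6, 8, 4, 2][n % 4]
-- ===== Notes on version B (the rewrite author's own statement) =====
-- stated objective: faster
-- what changed: Replaced the n-step multiply-mod loop by a constant-time lookup of the last digit of 8^n in its period-4 cycle indexed by n % 4.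
import Mathlib
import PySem

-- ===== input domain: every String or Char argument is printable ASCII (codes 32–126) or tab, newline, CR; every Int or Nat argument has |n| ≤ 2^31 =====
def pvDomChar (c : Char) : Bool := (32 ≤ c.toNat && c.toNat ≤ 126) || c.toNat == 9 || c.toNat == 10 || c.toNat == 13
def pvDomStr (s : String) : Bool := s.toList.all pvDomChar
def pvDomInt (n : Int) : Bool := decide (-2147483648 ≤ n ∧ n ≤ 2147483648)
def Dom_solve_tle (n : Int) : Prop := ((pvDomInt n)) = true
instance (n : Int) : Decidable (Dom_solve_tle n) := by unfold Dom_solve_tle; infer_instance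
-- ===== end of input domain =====

-- B replaces A's n-step multiply-mod loop by a constant-time lookup of the last
-- digit of 8^n in its period-4 cycle, indexed by n % 4 (objective: faster).

-- ===== PORT A =====
def solve_tle (n : Int) : Int :=
  if n = 0 then 1
  else (PySem.List.pyRange 0 n 1).foldl (fun result _ => PySem.Int.mod (result * 8) 10) 1

-- ===== PORT B =====
-- the pyGetD default 0 is never used: 0 ≤ n % 4 < 4 always indexes the 4-element table
def solve_tle_alt (n : Int) : Int :=
  if n ≤ 0 then 1
  else PySem.List.pyGetD [6, 8, 4, 2] (PySem.Int.mod n 4) 0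

-- ===== PRECONDITION & SPEC =====
def Spec_solve_tle (n : Int) (out : Int) : Prop := out = solve_tle_alt n
instance (n : Int) (out : Int) : Decidable (Spec_solve_tle n out) := by unfold Spec_solve_tle; infer_instance

-- ===== CLAIM (what is proved, stated in full; the proofs are below) =====
def Claim_equal_solve_tle : Prop := ∀ (n : Int), Dom_solve_tle n → Spec_solve_tle n (solve_tle n)

-- ===== LEMMAS AND PROOFS =====

-- A's loop after k iterations, as a function of the iteration count
def loopA (k : Nat) : Int := (List.range k).foldl (fun result _ => PySem.Int.mod (result * 8) 10) 1

theorem loopA_succ (k : Nat) : loopA (k + 1) = PySem.Int.mod (loopA k * 8) 10 := by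
  simp [loopA, List.range_succ]

-- after at least one iteration, the loop value is the period-4 table entry at k % 4
theorem loopA_table (k : Nat) :
    loopA (k + 1) = PySem.List.pyGetD [6, 8, 4, 2] (((k + 1) % 4 : Nat) : Int) 0 := by
  induction k with
  | zero => decide
  | succ k ih =>
    have h : (k + 1) % 4 = 0 ∨ (k + 1) % 4 = 1 ∨ (k + 1) % 4 = 2 ∨ (k + 1) % 4 = 3 := by omega
    rw [loopA_succ, ih]
    rcases h with h | h | h | h <;>
      · have h2 : (k + 1 + 1) % 4 = ((k + 1) % 4 + 1) % 4 := by omega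
        rw [h2, h]; decide

theorem solve_tle_spec : Claim_equal_solve_tle := by
  intro n _
  unfold Spec_solve_tle solve_tle solve_tle_alt
  rcases lt_trichotomy n 0 with hlt | heq | hgt
  · rw [if_neg (by omega), if_pos (by omega), PySem.List.pyRange_one_eq_nil (by omega)]
    rfl
  · simp [heq]
  · rw [if_neg (by omega), if_neg (by omega)]
    obtain ⟨m, rfl⟩ : ∃ m : Nat, n = ((m : Int) + 1) :=
      ⟨(n - 1).toNat, by omega⟩
    rw [PySem.List.pyRange_one]
    rw [List.foldl_map]
    have hcast : ((m : Int) + 1 - 0).toNat = m + 1 := by omega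
    rw [hcast]
    have hmod : PySem.Int.mod ((m : Int) + 1) 4 = (((m + 1) % 4 : Nat) : Int) := by
      have := PySem.Int.mod_natCast (m + 1) 4
      push_cast at this ⊢
      omega
    rw [hmod]
    exact loopA_table m
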